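-- pv_equiv track=rewrite | github.com/lod531/nnlp | src/range_functions.py | verify_bounds
-- ===== SOURCE A (Python) =====
-- def verify_bounds(output_bounds, label):
--     verified_flag = True
--     predicted_label = 0
--     inf = output_bounds[label][0]
--     for j in range(len(output_bounds)):
--         if(j!=label):
--             sup = output_bounds[j][1]
--             if(inf<=sup):
--                 predicted_label = label
--                 verified_flag = False
--                 break
--     return predicted_label, verified_flag
-- ===== SOURCE B (Python) =====
-- def verify_bounds(output_bounds, label):
--     inf = output_bounds[label][0]
--     # one pass maintaining the two largest upper bounds and the first argmax index;
--     # no per-element comparison with inf and no filtering of the label's entry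
--     best = second = None
--     best_idx = -1
--     for j, (_, sup) in enumerate(output_bounds):
--         if best is None or sup > best:
--             best, second, best_idx = sup, best, j
--         elif second is None or sup > second:
--             second = sup
--     max_others = second if best_idx == label else best
--     if max_others is not None and inf <= max_others:
--         return label, False
--     return 0, True
-- ===== Notes on version B (the rewrite author's own statement) =====
-- stated objective: alternative
-- what changed: Replaces A's early-exit existence scan (comparing inf against each other class's upper bound with a break) by a single aggregation pass that maintains the two largest upper bounds and the first argmax index with no filtering and no per-element use of inf, then selects best or second-best depending on whether the argmax position is the label and decides with one final comparison.
import Mathlib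
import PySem

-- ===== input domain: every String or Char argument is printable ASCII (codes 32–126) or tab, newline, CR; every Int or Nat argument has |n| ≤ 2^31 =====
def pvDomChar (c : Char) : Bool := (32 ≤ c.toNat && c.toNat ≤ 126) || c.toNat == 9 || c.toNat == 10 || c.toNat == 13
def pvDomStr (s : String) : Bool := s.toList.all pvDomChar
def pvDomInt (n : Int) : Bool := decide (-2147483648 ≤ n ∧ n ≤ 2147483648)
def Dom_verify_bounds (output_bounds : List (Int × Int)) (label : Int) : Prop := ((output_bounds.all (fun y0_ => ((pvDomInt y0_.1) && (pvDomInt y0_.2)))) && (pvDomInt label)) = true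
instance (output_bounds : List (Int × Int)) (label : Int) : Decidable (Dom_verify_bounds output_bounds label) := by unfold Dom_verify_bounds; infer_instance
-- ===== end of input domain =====

-- B replaces A's early-exit existence scan by a top-two-maxima aggregation pass
-- (best, second-best upper bound and first argmax index, no filtering, no use of
-- inf inside the loop) followed by one comparison: objective 'alternative', same O(n).

-- ===== PORT A =====
-- A's for-loop over range(len(output_bounds)) with break, transliterated as an
-- early-exit recursion over the index list.
def verifyLoopA (output_bounds : List (Int × Int)) (label inf : Int) : List Int → Int × Bool
  | [] => (0, true)
  | j :: rest =>
    if j ≠ label then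
      let sup := (PySem.List.pyGetD output_bounds j (0, 0)).2
      if inf ≤ sup then (label, false) else verifyLoopA output_bounds label inf rest
    else verifyLoopA output_bounds label inf rest

def verify_bounds (output_bounds : List (Int × Int)) (label : Int) : Int × Bool :=
  match PySem.List.pyGet? output_bounds label with
  | none => (0, true)   -- output_bounds[label] raises IndexError: excluded by Pre_
  | some b => verifyLoopA output_bounds label b.1 (PySem.List.pyRange 0 output_bounds.length 1)

-- ===== PORT B =====
-- Source B's loop: state (best, second, best_idx), branch order as in the Python.
def verifyLoopB : List ((Int × Int) × Nat) → Option Int → Option Int → Int → Option Int × Option Int × Int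
  | [], best, second, bi => (best, second, bi)
  | (p, j) :: rest, best, second, bi =>
    match best with
    | none => verifyLoopB rest (some p.2) best (j : Int)
    | some b =>
      if p.2 > b then verifyLoopB rest (some p.2) (some b) (j : Int)
      else
        match second with
        | none => verifyLoopB rest best (some p.2) bi
        | some s => if p.2 > s then verifyLoopB rest best (some p.2) bi
                    else verifyLoopB rest best second bi

def verify_bounds_alt (output_bounds : List (Int × Int)) (label : Int) : Int × Bool :=
  match PySem.List.pyGet? output_bounds label with
  | none => (0, true)   -- output_bounds[label] raises IndexError: excluded by Pre_
  | some b =>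
    match verifyLoopB output_bounds.zipIdx none none (-1) with
    | (best, second, bi) =>
      let max_others := if bi = label then second else best
      match max_others with
      | none => (0, true)
      | some m => if b.1 ≤ m then (label, false) else (0, true)

-- ===== PRECONDITION & SPEC =====
-- Pre_: label must be a valid (possibly negative) Python index, else A raises IndexError.
def Pre_verify_bounds (output_bounds : List (Int × Int)) (label : Int) : Prop :=
  PySem.Raise.InRange output_bounds.length label
instance (output_bounds : List (Int × Int)) (label : Int) : Decidable (Pre_verify_bounds output_bounds label) := by unfold Pre_verify_bounds; infer_instance

def pvWitness_verify_bounds : (List (Int × Int)) × Int := ([(1, 2), (0, 5)], 0)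

def Spec_verify_bounds (output_bounds : List (Int × Int)) (label : Int) (out : Int × Bool) : Prop := out = verify_bounds_alt output_bounds label
instance (output_bounds : List (Int × Int)) (label : Int) (out : Int × Bool) : Decidable (Spec_verify_bounds output_bounds label out) := by unfold Spec_verify_bounds; infer_instance

-- ===== CLAIM (what is proved, stated in full; the proofs are below) =====
def Claim_equal_verify_bounds : Prop := ∀ (output_bounds : List (Int × Int)) (label : Int), Dom_verify_bounds output_bounds label → Pre_verify_bounds output_bounds label → Spec_verify_bounds output_bounds label (verify_bounds output_bounds label)

-- ===== LEMMAS AND PROOFS =====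

-- combine two optional maxima
def oMax : Option Int → Option Int → Option Int
  | none, y => y
  | some x, none => some x
  | some x, some y => some (max x y)

-- the maximum upper bound among entries whose index differs from label
def omaxOthers (l : List ((Int × Int) × Nat)) (label : Int) : Option Int :=
  l.foldr (fun q acc => if (q.2 : Int) ≠ label then oMax (some q.1.2) acc else acc) none

lemma oMax_none_right (x : Option Int) : oMax x none = x := by cases x <;> rfl

lemma oMax_some_some (t u : Int) (x : Option Int) :
    oMax (some t) (oMax (some u) x) = oMax (some (max t u)) x := by
  cases x <;> simp [oMax, max_assoc]

lemma oMax_congr_left {x y : Int} (h : x = y) (z : Option Int) :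
    oMax (some x) z = oMax (some y) z := by rw [h]

-- the selected value after the loop, as a function of the final state
def selB (st : Option Int × Option Int × Int) (label : Int) : Option Int :=
  if st.2.2 = label then st.2.1 else st.1

-- loop invariant: the selected value of the final state is the max of the
-- selected value of the entering state and the other-indices max of the rest.
lemma verifyLoopB_sel (label : Int) :
    ∀ (rest : List ((Int × Int) × Nat)) (best second : Option Int) (bi : Int),
    (best = none → second = none) →
    (∀ m, best = some m → (∀ s, second = some s → s ≤ m)) →
    (∀ q ∈ rest, (q.2 : Int) ≠ bi) →
    (rest.map (fun q => (q.2 : Int))).Nodup →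
    selB (verifyLoopB rest best second bi) label
      = oMax (selB (best, second, bi) label) (omaxOthers rest label) := by
  intro rest
  induction rest with
  | nil => intro best second bi _ _ _ _; simp [verifyLoopB, omaxOthers, oMax_none_right]
  | cons q rest ih =>
    intro best second bi h0 h1 hbi hnd
    obtain ⟨p, j⟩ := q
    have hjbi : (j : Int) ≠ bi := hbi (p, j) (List.mem_cons_self ..)
    have hrbi : ∀ q ∈ rest, (q.2 : Int) ≠ (j : Int) := by
      intro q hq
      have := (List.nodup_cons.mp hnd).1
      intro he
      exact this (by simpa [he] using List.mem_map_of_mem (f := fun q => ((q.2 : Nat) : Int)) hq)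
    have hbi' : ∀ q ∈ rest, (q.2 : Int) ≠ bi := fun q hq => hbi q (List.mem_cons_of_mem _ hq)
    have hnd' : (rest.map (fun q => (q.2 : Int))).Nodup := (List.nodup_cons.mp hnd).2
    have homax : omaxOthers ((p, j) :: rest) label
        = if (j : Int) ≠ label then oMax (some p.2) (omaxOthers rest label)
          else omaxOthers rest label := by
      simp [omaxOthers]
    cases hb : best with
    | none =>
      have hs : second = none := h0 hb
      subst hs
      rw [show verifyLoopB ((p, j) :: rest) none none bi
            = verifyLoopB rest (some p.2) none (j : Int) from rfl]
      rw [ih (some p.2) none (j : Int) (by simp) (by intro m hm s hs; cases hs) hrbi hnd']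
      rw [homax]
      by_cases hjl : (j : Int) = label <;>
        simp [selB, hjl, oMax]
    | some m =>
      have hsm : ∀ s, second = some s → s ≤ m := h1 m hb
      by_cases hgt : p.2 > m
      · rw [show verifyLoopB ((p, j) :: rest) (some m) second bi
              = verifyLoopB rest (some p.2) (some m) (j : Int) from by
            simp [verifyLoopB, hgt]]
        rw [ih (some p.2) (some m) (j : Int) (by simp)
            (by intro m' hm' s hs; cases hm'; cases hs; omega) hrbi hnd']
        rw [homax]
        by_cases hjl : (j : Int) = label
        · -- j = label: the new entry is filtered out; bi ≠ label since (j:Int) ≠ bi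
          have hbil : bi ≠ label := by omega
          simp [selB, hjl, hbil]
        · -- j ≠ label: absorb the old selection (≤ m < p.2) into the new max
          rw [if_pos hjl]
          simp only [selB, if_neg hjl]
          by_cases hbil : bi = label
          · rw [if_pos hbil]
            cases hsd : second with
            | none => simp [oMax]
            | some s =>
              have hsle : s ≤ m := hsm s hsd
              rw [oMax_some_some]
              exact (oMax_congr_left (by omega) _).symm
          · rw [if_neg hbil, oMax_some_some]
            exact (oMax_congr_left (by omega) _).symm
      · -- p.2 ≤ m : best unchanged, second becomes max of itself and p.2
        have h2v : ∀ s : Int, (if p.2 > s then some p.2 else some s) = some (max p.2 s) := by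
          intro s; by_cases hps : p.2 > s <;> simp [hps] <;> omega
        have step : verifyLoopB ((p, j) :: rest) (some m) second bi
            = verifyLoopB rest (some m) (some (second.elim p.2 (fun s => max p.2 s))) bi := by
          cases second with
          | none => simp [verifyLoopB, hgt]
          | some s =>
            by_cases hps : p.2 > s
            · have hm : max p.2 s = p.2 := by omega
              simp [verifyLoopB, hgt, hps, hm]
            · have hm : max p.2 s = s := by omega
              simp [verifyLoopB, hgt, hps, hm]
        rw [step]
        have hs'le : second.elim p.2 (fun s => max p.2 s) ≤ m := by
          cases hsd : second with
          | none => simp; omega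
          | some t => have := hsm t hsd; simp; omega
        rw [ih (some m) (some (second.elim p.2 (fun s => max p.2 s))) bi (by simp)
            (by intro m' hm' s hs; cases hm'; cases hs; exact hs'le) hbi' hnd']
        rw [homax]
        by_cases hjl : (j : Int) = label
        · -- filtered out; bi ≠ label (since (j:Int) ≠ bi), so selection = some m on both sides
          have hbil : bi ≠ label := by omega
          simp [selB, hbil, hjl]
        · rw [if_pos hjl]
          simp only [selB]
          by_cases hbil : bi = label
          · rw [if_pos hbil, if_pos hbil]
            cases hsd : second with
            | none => simp [oMax]
            | some t =>
              simp only [Option.elim]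
              rw [oMax_some_some]
              exact oMax_congr_left (by omega) _
          · rw [if_neg hbil, if_neg hbil, oMax_some_some]
            exact (oMax_congr_left (by omega) _).symm

-- A's loop result, characterised: (label, False) iff some other index has sup ≥ inf.
lemma loopA_eq_if (output_bounds : List (Int × Int)) (label inf : Int) (l : List Int) :
    verifyLoopA output_bounds label inf l =
      if l.any (fun j => decide (j ≠ label) && decide (inf ≤ (PySem.List.pyGetD output_bounds j (0, 0)).2))
      then (label, false) else (0, true) := by
  induction l with
  | nil => simp [verifyLoopA]
  | cons j rest ih =>
    by_cases hj : j = label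
    · simp [verifyLoopA, hj, ih]
    · by_cases hs : inf ≤ (PySem.List.pyGetD output_bounds j (0, 0)).2
      · simp [verifyLoopA, hj, hs]
      · simp [verifyLoopA, hj, hs, ih]

-- the existence question A answers, in terms of nat indices
lemma exists_iff_range (obs : List (Int × Int)) (label inf : Int) :
    ((PySem.List.pyRange 0 obs.length 1).any
        (fun j => decide (j ≠ label) && decide (inf ≤ (PySem.List.pyGetD obs j (0, 0)).2)) = true)
      ↔ ∃ j : Nat, ∃ _ : j < obs.length, (j : Int) ≠ label ∧ inf ≤ obs[j].2 := by
  rw [List.any_eq_true]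
  constructor
  · rintro ⟨j, hj, hp⟩
    rw [PySem.List.mem_pyRange_one] at hj
    obtain ⟨h0, hn⟩ := hj
    simp only [Bool.and_eq_true, decide_eq_true_eq] at hp
    refine ⟨j.toNat, by omega, ?_, ?_⟩
    · omega
    · have := PySem.List.pyGetD_eq_getElem obs (0, 0) h0 (by exact_mod_cast hn)
      rw [this] at hp; exact hp.2
  · rintro ⟨j, hlt, hne, hle⟩
    refine ⟨(j : Int), ?_, ?_⟩
    · rw [PySem.List.mem_pyRange_one]; constructor <;> [positivity; exact_mod_cast hlt]
    · simp only [Bool.and_eq_true, decide_eq_true_eq]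
      refine ⟨hne, ?_⟩
      have := PySem.List.pyGetD_eq_getElem obs (i := (j : Int)) (0, 0) (by exact_mod_cast Nat.zero_le j) (by exact_mod_cast hlt)
      rw [this]; simpa using hle

-- membership in zipIdx, index form
lemma mem_zipIdx_iff (obs : List (Int × Int)) (q : (Int × Int) × Nat) :
    q ∈ obs.zipIdx ↔ ∃ _ : q.2 < obs.length, obs[q.2] = q.1 := by
  obtain ⟨b, j⟩ := q
  rw [List.mem_zipIdx_iff_getElem?]
  constructor
  · intro h
    have hj : j < obs.length := by
      by_contra hc
      rw [List.getElem?_eq_none (by omega)] at h; simp at h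
    rw [List.getElem?_eq_getElem hj] at h
    exact ⟨hj, by cases h; rfl⟩
  · rintro ⟨hj, hb⟩
    rw [List.getElem?_eq_getElem hj, hb]

lemma omaxOthers_none_iff (l : List ((Int × Int) × Nat)) (label : Int) :
    omaxOthers l label = none ↔ ∀ q ∈ l, (q.2 : Int) = label := by
  induction l with
  | nil => simp [omaxOthers]
  | cons q rest ih =>
    by_cases hq : (q.2 : Int) = label
    · simpa [omaxOthers, hq] using ih
    · constructor
      · intro h
        exfalso
        have : omaxOthers (q :: rest) label
            = oMax (some q.1.2) (omaxOthers rest label) := by simp [omaxOthers, hq]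
        rw [this] at h
        cases hr : omaxOthers rest label <;> simp [hr, oMax] at h
      · intro h
        exact absurd (h q (List.mem_cons_self ..)) hq

lemma omaxOthers_some (l : List ((Int × Int) × Nat)) (label m : Int)
    (h : omaxOthers l label = some m) :
    (∃ q ∈ l, (q.2 : Int) ≠ label ∧ q.1.2 = m)
      ∧ (∀ q ∈ l, (q.2 : Int) ≠ label → q.1.2 ≤ m) := by
  induction l generalizing m with
  | nil => simp [omaxOthers] at h
  | cons q rest ih =>
    by_cases hq : (q.2 : Int) = label
    · have h' : omaxOthers rest label = some m := by simpa [omaxOthers, hq] using h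
      obtain ⟨⟨q', hq', hne, he⟩, hub⟩ := ih m h'
      exact ⟨⟨q', List.mem_cons_of_mem _ hq', hne, he⟩, by
        intro r hr hrne
        rcases List.mem_cons.mp hr with h1 | h1
        · subst h1; exact absurd hq hrne
        · exact hub r h1 hrne⟩
    · have h' : oMax (some q.1.2) (omaxOthers rest label) = some m := by
        simpa [omaxOthers, hq] using h
      cases hr : omaxOthers rest label with
      | none =>
        rw [hr] at h'; simp [oMax] at h'
        have hall := (omaxOthers_none_iff rest label).mp hr
        exact ⟨⟨q, List.mem_cons_self .., hq, h'⟩, by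
          intro r hrm hrne
          rcases List.mem_cons.mp hrm with h1 | h1
          · subst h1; omega
          · exact absurd (hall r h1) hrne⟩
      | some t =>
        rw [hr] at h'; simp [oMax] at h'
        obtain ⟨⟨q', hq', hne, he⟩, hub⟩ := ih t hr
        have hub' : ∀ r ∈ q :: rest, (r.2 : Int) ≠ label → r.1.2 ≤ m := by
          intro r hrm hrne
          rcases List.mem_cons.mp hrm with h1 | h1
          · subst h1; omega
          · have := hub r h1 hrne; omega
        by_cases hc : q.1.2 ≤ t
        · exact ⟨⟨q', List.mem_cons_of_mem _ hq', hne, by omega⟩, hub'⟩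
        · exact ⟨⟨q, List.mem_cons_self .., hq, by omega⟩, hub'⟩

-- zipIdx indices, cast to Int, are Nodup
lemma zipIdx_idx_nodup (obs : List (Int × Int)) :
    (obs.zipIdx.map (fun q => ((q.2 : Nat) : Int))).Nodup := by
  have h1 : (obs.zipIdx.map Prod.snd).Nodup := List.nodup_zipIdx_map_snd obs
  have h2 : (obs.zipIdx.map (fun q => ((q.2 : Nat) : Int)))
      = (obs.zipIdx.map Prod.snd).map (fun n : Nat => (n : Int)) := by
    rw [List.map_map]; rfl
  rw [h2]
  exact h1.map (fun a b h => by exact_mod_cast h)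

theorem verify_bounds_spec : Claim_equal_verify_bounds := by
  intro obs label _ hpre
  unfold Spec_verify_bounds verify_bounds verify_bounds_alt
  rcases h : PySem.List.pyGet? obs label with _ | b
  · simp
  · simp only
    rw [loopA_eq_if]
    rcases hst : verifyLoopB obs.zipIdx none none (-1) with ⟨best, second, bi⟩
    have hsel := verifyLoopB_sel label obs.zipIdx none none (-1)
      (fun _ => rfl) (by intro m hm; cases hm)
      (by intro q _; omega) (zipIdx_idx_nodup obs)
    rw [hst] at hsel
    have hsel' : selB (best, second, bi) label = omaxOthers obs.zipIdx label := by
      rw [hsel]; simp [selB, oMax]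
    -- reduce both sides to the same existence statement
    have hexists : ∀ (mo : Option Int), mo = omaxOthers obs.zipIdx label →
        ((match mo with
          | none => ((0 : Int), true)
          | some m => if b.1 ≤ m then (label, false) else ((0 : Int), true))
         = if (PySem.List.pyRange 0 obs.length 1).any
              (fun j => decide (j ≠ label) && decide (b.1 ≤ (PySem.List.pyGetD obs j (0, 0)).2))
           then (label, false) else ((0 : Int), true)) := by
      intro mo hmo
      cases mo with
      | none =>
        rw [if_neg]
        intro hany
        rw [exists_iff_range] at hany
        obtain ⟨j, hlt, hne, _⟩ := hany
        have hall := (omaxOthers_none_iff obs.zipIdx label).mp hmo.symm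
        exact hne (hall (obs[j], j) ((mem_zipIdx_iff obs _).mpr ⟨hlt, rfl⟩))
      | some m =>
        obtain ⟨⟨q, hqmem, hqne, hqe⟩, hub⟩ := omaxOthers_some obs.zipIdx label m hmo.symm
        by_cases hle : b.1 ≤ m
        · simp only [hle, if_true]
          rw [if_pos]
          obtain ⟨hlt, hget⟩ := (mem_zipIdx_iff obs q).mp hqmem
          exact (exists_iff_range obs label b.1).2 ⟨q.2, hlt, hqne, by rw [hget, hqe]; omega⟩
        · simp only [hle, if_false]
          rw [if_neg]
          intro hany
          rw [exists_iff_range] at hany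
          obtain ⟨j, hlt, hne, hj⟩ := hany
          have := hub (obs[j], j) ((mem_zipIdx_iff obs _).mpr ⟨hlt, rfl⟩) hne
          simp only at this
          omega
    exact (hexists _ hsel').symm
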